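-- pv_equiv track=rewrite | github.com/Green-JEONG/Green-JEONG_Algorithm_Study | 프로그래머스/1/133502. 햄버거 만들기/햄버거 만들기.py | solution
-- ===== SOURCE A (Python) =====
-- def solution(ingredient):
--     stack = []
--     cnt = 0
--
--     for i in ingredient:
--         stack.append(i)
--
--         # 스택에 재료가 4개 이상 쌓인 동시에, 마지막 4개가 [빵-야채-고기-빵]일 때,
--         if stack[-4:] == [1, 2, 3, 1]:
--             cnt += 1
--             for _ in range(4):
--                 stack.pop()
--
--     return cnt
-- ===== SOURCE B (Python) =====
-- def solution(ingredient):
--     items = list(ingredient)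
--     cnt = 0
--     while True:
--         for i in range(len(items) - 3):
--             if items[i:i+4] == [1, 2, 3, 1]:
--                 del items[i:i+4]
--                 cnt += 1
--                 break
--         else:
--             return cnt
-- ===== Notes on version B (the rewrite author's own statement) =====
-- stated objective: alternative
-- what changed: Replaces the single stack-building pass (push, check last four, pop four) with repeated left-to-right scans that delete the leftmost [1,2,3,1] occurrence from a copy of the list until none remains.
import Mathlib
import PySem

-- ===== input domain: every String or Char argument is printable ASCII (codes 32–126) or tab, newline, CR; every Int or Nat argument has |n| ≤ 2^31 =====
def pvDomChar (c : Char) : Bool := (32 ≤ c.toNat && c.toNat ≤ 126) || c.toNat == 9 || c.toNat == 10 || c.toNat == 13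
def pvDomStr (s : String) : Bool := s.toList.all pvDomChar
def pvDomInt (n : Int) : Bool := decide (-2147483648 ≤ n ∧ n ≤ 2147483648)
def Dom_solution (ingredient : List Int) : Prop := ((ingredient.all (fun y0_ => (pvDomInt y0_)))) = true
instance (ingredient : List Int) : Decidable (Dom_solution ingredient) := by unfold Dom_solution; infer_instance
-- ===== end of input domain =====

-- B is an alternative algorithm (repeated leftmost-occurrence deletion) of similar intent; not faster.

-- ===== PORT A =====
-- single pass: push each ingredient on a stack; when the last four are [1,2,3,1], pop them and count
def solution (ingredient : List Int) : Int :=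
  (ingredient.foldl
    (fun (s : List Int × Int) i =>
      let stack := s.1 ++ [i]
      if PySem.List.slice stack (some (-4)) none = ([1, 2, 3, 1] : List Int) then
        -- cnt += 1; for _ in range(4): stack.pop()
        (stack.dropLast.dropLast.dropLast.dropLast, s.2 + 1)
      else (stack, s.2))
    ([], 0)).2

-- ===== PORT B =====
-- scan for the leftmost index whose 4-slice equals [1,2,3,1] and delete it (one combined pass);
-- none found = the for-else 'return cnt'
def removeFirst : List Int → Option (List Int)
  | [] => none
  | x :: xs =>
      if (x :: xs).take 4 = ([1, 2, 3, 1] : List Int) then some (xs.drop 3)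
      else (removeFirst xs).map (x :: ·)

theorem removeFirst_length : ∀ (l l' : List Int), removeFirst l = some l' → l'.length < l.length := by
  intro l
  induction l with
  | nil => intro l' h; simp [removeFirst] at h
  | cons x xs ih =>
      intro l' h
      unfold removeFirst at h
      split at h
      · cases h
        simp only [List.length_drop, List.length_cons]
        omega
      · cases hr : removeFirst xs with
        | none => rw [hr] at h; simp at h
        | some t =>
            rw [hr] at h
            cases h
            have := ih t hr
            simp only [List.length_cons]
            omega

-- while True: delete leftmost occurrence and count, until none remains
def solLoop (items : List Int) (cnt : Int) : Int :=
  match h : removeFirst items with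
  | some items' => solLoop items' (cnt + 1)
  | none => cnt
termination_by items.length
decreasing_by exact removeFirst_length _ _ h

def solution_alt (ingredient : List Int) : Int := solLoop ingredient 0

-- ===== PRECONDITION & SPEC =====
def Spec_solution (ingredient : List Int) (out : Int) : Prop := out = solution_alt ingredient
instance (ingredient : List Int) (out : Int) : Decidable (Spec_solution ingredient out) := by unfold Spec_solution; infer_instance

-- ===== CLAIM (what is proved, stated in full; the proofs are below) =====
def Claim_equal_solution : Prop := ∀ (ingredient : List Int), Dom_solution ingredient → Spec_solution ingredient (solution ingredient)

-- ===== LEMMAS AND PROOFS =====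

-- an occurrence of the pattern [1,2,3,1] as a contiguous sublist
def Occ (l : List Int) : Prop := ∃ u v, l = u ++ [1, 2, 3, 1] ++ v

theorem occ_of_take (l : List Int) (h : l.take 4 = [1, 2, 3, 1]) : Occ l := by
  refine ⟨[], l.drop 4, ?_⟩
  have := List.take_append_drop 4 l
  rw [h] at this
  simpa using this.symm

theorem occ_cons_iff (x : Int) (xs : List Int) :
    Occ (x :: xs) ↔ (x :: xs).take 4 = [1, 2, 3, 1] ∨ Occ xs := by
  constructor
  · rintro ⟨u, v, h⟩
    cases u with
    | nil =>
        left
        simp at h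
        obtain ⟨h1, h2⟩ := h
        subst h1; subst h2
        rfl
    | cons a u' =>
        right
        simp at h
        exact ⟨u', v, by simp [h.2]⟩
  · rintro (h | ⟨u, v, h⟩)
    · exact occ_of_take _ h
    · exact ⟨x :: u, v, by simp [h]⟩

theorem removeFirst_none_iff (l : List Int) : removeFirst l = none ↔ ¬ Occ l := by
  induction l with
  | nil =>
      simp only [removeFirst, true_iff]
      rintro ⟨u, v, h⟩
      have := congrArg List.length h
      simp at this
  | cons x xs ih =>
      rw [occ_cons_iff]
      unfold removeFirst
      split
      · next htake =>
          exact iff_of_false (by simp) (fun hh => hh (Or.inl htake))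
      · next htake =>
          constructor
          · intro hh
            rcases hr : removeFirst xs with _ | t
            · rintro (hc | ho)
              · exact htake hc
              · exact (ih.mp hr) ho
            · rw [hr] at hh; simp at hh
          · intro hh
            have : ¬ Occ xs := fun ho => hh (Or.inr ho)
            rw [ih.mpr this]
            rfl

theorem removeFirst_append (u v : List Int) (h : ¬ Occ (u ++ [1, 2, 3])) :
    removeFirst (u ++ 1 :: 2 :: 3 :: 1 :: v) = some (u ++ v) := by
  induction u with
  | nil => simp [removeFirst]
  | cons a u' ih =>
      have hne : ((a :: u') ++ 1 :: 2 :: 3 :: 1 :: v).take 4 ≠ [1, 2, 3, 1] := by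
        intro hc
        apply h
        have hsplit : (a :: u') ++ 1 :: 2 :: 3 :: 1 :: v
            = ((a :: u') ++ [1, 2, 3]) ++ (1 :: v) := by simp
        have hlen : 4 ≤ ((a :: u') ++ [1, 2, 3]).length := by
          simp only [List.length_append, List.length_cons]
          omega
        rw [hsplit, List.take_append_of_le_length hlen] at hc
        exact occ_of_take _ hc
      have hocc : ¬ Occ (u' ++ [1, 2, 3]) := by
        rintro ⟨p, q, hp⟩
        exact h ⟨a :: p, q, by simp [hp]⟩
      show removeFirst (a :: (u' ++ 1 :: 2 :: 3 :: 1 :: v)) = _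
      unfold removeFirst
      rw [if_neg (by simpa using hne), ih hocc]
      rfl

theorem solLoop_some (l l' : List Int) (c : Int) (h : removeFirst l = some l') :
    solLoop l c = solLoop l' (c + 1) := by
  conv_lhs => unfold solLoop
  split
  · next t ht => rw [h] at ht; cases ht; rfl
  · next ht => rw [h] at ht; cases ht

theorem solLoop_none (l : List Int) (c : Int) (h : ¬ Occ l) : solLoop l c = c := by
  unfold solLoop
  split
  · next t ht => rw [(removeFirst_none_iff l).mpr h] at ht; cases ht
  · rfl

theorem solLoop_occ (u v : List Int) (c : Int) (h : ¬ Occ (u ++ [1, 2, 3])) :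
    solLoop (u ++ 1 :: 2 :: 3 :: 1 :: v) c = solLoop (u ++ v) (c + 1) :=
  solLoop_some _ _ _ (removeFirst_append u v h)

-- the A-side condition, rephrased: the stack ends with the pattern
theorem slice_last4 (stack : List Int) :
    PySem.List.slice stack (some (-4)) none = stack.drop (stack.length - 4) := by
  exact PySem.List.slice_from_neg_ofNat stack 4 (by omega)

-- main loop invariant
theorem main_lemma (l : List Int) : ∀ (st : List Int) (c : Int), ¬ Occ st →
    (l.foldl
      (fun (s : List Int × Int) i =>
        let stack := s.1 ++ [i]
        if PySem.List.slice stack (some (-4)) none = ([1, 2, 3, 1] : List Int) then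
          (stack.dropLast.dropLast.dropLast.dropLast, s.2 + 1)
        else (stack, s.2))
      (st, c)).2 = solLoop (st ++ l) c := by
  induction l with
  | nil =>
      intro st c h
      simp [solLoop_none st c h]
  | cons i l ih =>
      intro st c h
      rw [List.foldl_cons]
      simp only
      rw [slice_last4]
      by_cases hcond : (st ++ [i]).drop ((st ++ [i]).length - 4) = ([1, 2, 3, 1] : List Int)
      · rw [if_pos hcond]
        have hlen : 4 ≤ (st ++ [i]).length := by
          have := congrArg List.length hcond
          simp only [List.length_drop] at this
          simp only [List.length_append, List.length_cons, List.length_nil] at this ⊢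
          omega
        set p := (st ++ [i]).take ((st ++ [i]).length - 4) with hp
        have hdecomp : st ++ [i] = p ++ [1, 2, 3, 1] := by
          rw [hp, ← hcond, List.take_append_drop]
        have hst : st = p ++ [1, 2, 3] ∧ i = 1 := by
          have h1 : st ++ [i] = (p ++ [1, 2, 3]) ++ [1] := by rw [hdecomp]; simp
          have h2 := List.append_inj' h1 rfl
          exact ⟨h2.1, by simpa using h2.2⟩
        have hdrop : (p ++ [1, 2, 3, 1] : List Int).dropLast.dropLast.dropLast.dropLast = p := by
          have e1 : (p ++ [1, 2, 3, 1] : List Int).dropLast = p ++ [1, 2, 3] := by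
            rw [show (p ++ [1, 2, 3, 1] : List Int) = (p ++ [1, 2, 3]) ++ [1] by simp,
              List.dropLast_concat]
          have e2 : (p ++ [1, 2, 3] : List Int).dropLast = p ++ [1, 2] := by
            rw [show (p ++ [1, 2, 3] : List Int) = (p ++ [1, 2]) ++ [3] by simp,
              List.dropLast_concat]
          have e3 : (p ++ [1, 2] : List Int).dropLast = p ++ [1] := by
            rw [show (p ++ [1, 2] : List Int) = (p ++ [1]) ++ [2] by simp,
              List.dropLast_concat]
          rw [e1, e2, e3, List.dropLast_concat]
        have hoccp : ¬ Occ p := by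
          rintro ⟨a, b, hab⟩
          exact h (by rw [hst.1, hab]; exact ⟨a, b ++ [1, 2, 3], by simp⟩)
        rw [hdecomp, hdrop, ih p (c + 1) hoccp]
        have hstl : st ++ i :: l = p ++ 1 :: 2 :: 3 :: 1 :: l := by
          rw [hst.1, hst.2]; simp
        rw [hstl, solLoop_occ p l c (by rw [← hst.1]; exact h)]
      · rw [if_neg hcond]
        have hocc' : ¬ Occ (st ++ [i]) := by
          rintro ⟨u, v, huv⟩
          rcases List.eq_nil_or_concat v with hv | ⟨v', w, hv⟩
          · subst hv
            apply hcond
            have he : st ++ [i] = u ++ [1, 2, 3, 1] := by simpa using huv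
            rw [he]
            have hl : (u ++ [1, 2, 3, 1] : List Int).length - 4 = u.length := by simp
            rw [hl, List.drop_left]
          · apply h
            subst hv
            have h1 : st ++ [i] = (u ++ [1, 2, 3, 1] ++ v') ++ [w] := by rw [huv]; simp
            have h2 := List.append_inj' h1 rfl
            exact ⟨u, v', by simpa using h2.1⟩
        rw [ih (st ++ [i]) c hocc']
        simp

-- ===== VERDICT (by name: the statement is the Claim_ definition above) =====
theorem solution_spec : Claim_equal_solution := by
  intro ingredient _
  unfold Spec_solution solution solution_alt
  have h0 : ¬ Occ ([] : List Int) := by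
    rintro ⟨u, v, h⟩
    have := congrArg List.length h
    simp at this
  simpa using main_lemma ingredient [] 0 h0
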